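-- pv_equiv track=rewrite | github.com/KennethEvans/VS-HeartPy | HeartPy/process_ecg.py | shift_score
-- ===== SOURCE A (Python) =====
-- def shift_score(score, shift):
--     ''' Shifts a list shift places to the right or left depending on the sign
--     of shift.
--     '''
--     shifted = score.copy()
--     if shift >= 0:
--         for i in range(shift):
--             shifted.pop()
--             shifted.insert(0, shifted[0])
--     else:
--         for i in range(-shift):
--             shifted.pop(0)
--             shifted.append(shifted[-1])
--     return shifted
-- ===== SOURCE B (Python) =====
-- def shift_score(score, shift):
--     ''' Shifts a list shift places to the right or left depending on the sign
--     of shift.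
--     '''
--     n = len(score)
--     if shift > 0:
--         pad = score[0]
--         return [pad if i < shift else score[i - shift] for i in range(n)]
--     if shift < 0:
--         m = -shift
--         pad = score[-1]
--         return [score[i + m] if i + m < n else pad for i in range(n)]
--     return score.copy()
-- ===== Notes on version B (the rewrite author's own statement) =====
-- stated objective: faster
-- what changed: Replaces the repeated pop/insert loop (shift passes of O(n) list shifting) by a single per-position comprehension that reads each output element from a clamped source index.
-- outside the precondition, e.g. on shift_score([5], 1): A raises IndexError, B returns [5]; on shift_score([5], -1): A raises IndexError, B returns [5]
import Mathlib
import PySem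

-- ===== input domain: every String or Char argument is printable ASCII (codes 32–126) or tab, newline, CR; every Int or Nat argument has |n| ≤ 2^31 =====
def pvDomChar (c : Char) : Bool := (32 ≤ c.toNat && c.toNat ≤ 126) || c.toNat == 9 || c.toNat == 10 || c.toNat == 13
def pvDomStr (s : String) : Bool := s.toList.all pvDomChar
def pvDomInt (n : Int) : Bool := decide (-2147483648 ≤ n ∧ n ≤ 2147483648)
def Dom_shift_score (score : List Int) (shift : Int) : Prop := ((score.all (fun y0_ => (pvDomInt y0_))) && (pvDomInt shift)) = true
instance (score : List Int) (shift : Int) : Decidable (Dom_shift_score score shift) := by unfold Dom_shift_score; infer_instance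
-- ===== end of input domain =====

-- B replaces A's repeated pop/insert passes by a single per-position map from a clamped source index (asymptotically fewer list operations).


-- ===== PORT A =====
def shift_score (score : List Int) (shift : Int) : List Int :=
  let shifted := score
  if shift ≥ 0 then
    (PySem.List.pyRange 0 shift 1).foldl (fun sh _i =>
      -- shifted.pop(); shifted.insert(0, shifted[0])
      let sh1 := ((PySem.List.pop? sh (-1)).map Prod.snd).getD sh
      PySem.List.insert sh1 0 ((PySem.List.pyGet? sh1 0).getD 0)) shifted
  else
    (PySem.List.pyRange 0 (-shift) 1).foldl (fun sh _i =>
      -- shifted.pop(0); shifted.append(shifted[-1])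
      let sh1 := ((PySem.List.pop? sh 0).map Prod.snd).getD sh
      sh1 ++ [(PySem.List.pyGet? sh1 (-1)).getD 0]) shifted

-- ===== PORT B =====
def shift_score_alt (score : List Int) (shift : Int) : List Int :=
  let n : Int := PySem.List.len score
  if shift > 0 then
    let pad := (PySem.List.pyGet? score 0).getD 0
    (PySem.List.pyRange 0 n 1).map (fun i =>
      if i < shift then pad else (PySem.List.pyGet? score (i - shift)).getD 0)
  else if shift < 0 then
    let m := -shift
    let pad := (PySem.List.pyGet? score (-1)).getD 0
    (PySem.List.pyRange 0 n 1).map (fun i =>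
      if i + m < n then (PySem.List.pyGet? score (i + m)).getD 0 else pad)
  else score

-- ===== PRECONDITION & SPEC =====
-- Pre_ excludes exactly the inputs where Python A raises IndexError: a nonzero shift on a
-- list of length 0 or 1 (A pops the list empty and then indexes it).
def Pre_shift_score (score : List Int) (shift : Int) : Prop :=
  shift = 0 ∨ 2 ≤ score.length
instance (score : List Int) (shift : Int) : Decidable (Pre_shift_score score shift) := by
  unfold Pre_shift_score; infer_instance
def pvWitness_shift_score : List Int × Int := ([1, 2, 3, 4], 2)

def Spec_shift_score (score : List Int) (shift : Int) (out : List Int) : Prop :=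
  out = shift_score_alt score shift
instance (score : List Int) (shift : Int) (out : List Int) : Decidable (Spec_shift_score score shift out) := by
  unfold Spec_shift_score; infer_instance

-- ===== CLAIM (what is proved, stated in full; the proofs are below) =====
def Claim_equal_shift_score : Prop := ∀ (score : List Int) (shift : Int), Dom_shift_score score shift → Pre_shift_score score shift → Spec_shift_score score shift (shift_score score shift)

-- ===== LEMMAS AND PROOFS =====

-- closed form of the k-th iterate of A's positive-shift loop body
def fP (s : List Int) (k : Nat) : List Int :=
  (List.range s.length).map (fun i => s.getD (if i < k then 0 else i - k) 0)

-- closed form of the k-th iterate of A's negative-shift loop body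
def fN (s : List Int) (k : Nat) : List Int :=
  (List.range s.length).map (fun i => s.getD (if i + k < s.length then i + k else s.length - 1) 0)

lemma getD_range_map (s : List Int) : (List.range s.length).map (fun i => s.getD i 0) = s := by
  apply List.ext_getElem
  · simp
  · intro i h1 h2
    simp only [List.getElem_map, List.getElem_range, List.getD_eq_getElem?_getD]
    rw [List.getElem?_eq_getElem (by simpa using h1)]
    simp

lemma fP_zero (s : List Int) : fP s 0 = s := by
  have h : fP s 0 = (List.range s.length).map (fun i => s.getD i 0) := by
    apply List.map_congr_left; intro i _; simp
  rw [h, getD_range_map]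

lemma fN_zero (s : List Int) : fN s 0 = s := by
  have h : fN s 0 = (List.range s.length).map (fun i => s.getD i 0) := by
    apply List.map_congr_left
    intro i hi
    simp only [List.mem_range] at hi
    simp [hi]
  rw [h, getD_range_map]

lemma fP_step (s : List Int) (hs : 2 ≤ s.length) (k : Nat) :
    (fun sh : List Int =>
      let sh1 := ((PySem.List.pop? sh (-1)).map Prod.snd).getD sh
      PySem.List.insert sh1 0 ((PySem.List.pyGet? sh1 0).getD 0)) (fP s k) = fP s (k + 1) := by
  obtain ⟨m, hm⟩ : ∃ m, s.length = m + 2 := ⟨s.length - 2, by omega⟩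
  simp only [fP, hm]
  set f : Nat → Int := fun i => s.getD (if i < k then 0 else i - k) 0 with hf
  set f' : Nat → Int := fun i => s.getD (if i < k + 1 then 0 else i - (k + 1)) 0 with hf'
  have h1 : List.range (m + 2) = List.range (m + 1) ++ [m + 1] := List.range_succ
  have h2 : (List.range (m + 2)).map f = (List.range (m + 1)).map f ++ [f (m + 1)] := by
    rw [h1]; simp
  rw [h2, PySem.List.pop?_last]
  simp only [Option.map_some, Option.getD_some]
  have h3 : (List.range (m + 1)).map f = f 0 :: (List.range m).map (fun i => f (i + 1)) := by
    rw [List.range_succ_eq_map]; simp [Function.comp]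
  rw [h3]
  have h4 : PySem.List.pyGet? (f 0 :: (List.range m).map (fun i => f (i + 1))) 0 = some (f 0) := by
    simp [PySem.List.pyGet?, PySem.List.pyIdx?]
  rw [h4, Option.getD_some, PySem.List.insert_zero, ← h3]
  have h5 : (List.range (m + 2)).map f' = f' 0 :: (List.range (m + 1)).map (fun i => f' (i + 1)) := by
    rw [List.range_succ_eq_map]; simp [Function.comp]
  rw [h5]
  congr 1
  · simp [hf, hf']
  · apply List.map_congr_left
    intro i _
    simp only [hf, hf']
    congr 1
    split_ifs with h a b <;> omega

lemma fN_step (s : List Int) (hs : 2 ≤ s.length) (k : Nat) :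
    (fun sh : List Int =>
      let sh1 := ((PySem.List.pop? sh 0).map Prod.snd).getD sh
      sh1 ++ [(PySem.List.pyGet? sh1 (-1)).getD 0]) (fN s k) = fN s (k + 1) := by
  obtain ⟨m, hm⟩ : ∃ m, s.length = m + 2 := ⟨s.length - 2, by omega⟩
  simp only [fN, hm]
  set f : Nat → Int := fun i => s.getD (if i + k < m + 2 then i + k else m + 2 - 1) 0 with hf
  set f' : Nat → Int := fun i => s.getD (if i + (k + 1) < m + 2 then i + (k + 1) else m + 2 - 1) 0 with hf'
  have h3 : (List.range (m + 2)).map f = f 0 :: (List.range (m + 1)).map (fun i => f (i + 1)) := by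
    rw [List.range_succ_eq_map]; simp [Function.comp]
  rw [h3, PySem.List.pop?_zero_cons]
  simp only [Option.map_some, Option.getD_some]
  have h2 : (List.range (m + 1)).map (fun i => f (i + 1))
      = (List.range m).map (fun i => f (i + 1)) ++ [f (m + 1)] := by
    rw [List.range_succ]; simp
  have h4 : PySem.List.pyGet? ((List.range (m + 1)).map (fun i => f (i + 1))) (-1)
      = some (f (m + 1)) := by
    rw [h2]; simp [PySem.List.pyGet?, PySem.List.pyIdx?]
  rw [h4, Option.getD_some]
  have h5 : (List.range (m + 2)).map f' = (List.range (m + 1)).map f' ++ [f' (m + 1)] := by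
    rw [List.range_succ]; simp
  rw [h5]
  congr 1
  · apply List.map_congr_left
    intro i _
    simp only [hf, hf']
    congr 1
    split_ifs with h a b <;> omega
  · simp only [hf, hf']
    have he : (if m + 1 + k < m + 2 then m + 1 + k else m + 2 - 1)
        = (if m + 1 + (k + 1) < m + 2 then m + 1 + (k + 1) else m + 2 - 1) := by
      split_ifs <;> omega
    rw [he]

lemma fP_iterate (s : List Int) (hs : 2 ≤ s.length) (k : Nat) (g : List Int → List Int)
    (hg : ∀ l, g l = ((fun sh : List Int =>
      let sh1 := ((PySem.List.pop? sh (-1)).map Prod.snd).getD sh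
      PySem.List.insert sh1 0 ((PySem.List.pyGet? sh1 0).getD 0)) l)) :
    g^[k] s = fP s k := by
  induction k with
  | zero => simpa using (fP_zero s).symm
  | succ k ih => rw [Function.iterate_succ_apply', ih, hg, fP_step s hs k]

lemma fN_iterate (s : List Int) (hs : 2 ≤ s.length) (k : Nat) (g : List Int → List Int)
    (hg : ∀ l, g l = ((fun sh : List Int =>
      let sh1 := ((PySem.List.pop? sh 0).map Prod.snd).getD sh
      sh1 ++ [(PySem.List.pyGet? sh1 (-1)).getD 0]) l)) :
    g^[k] s = fN s k := by
  induction k with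
  | zero => simpa using (fN_zero s).symm
  | succ k ih => rw [Function.iterate_succ_apply', ih, hg, fN_step s hs k]


lemma alt_pos (s : List Int) (shift : Int) (h : 0 < shift) (_hs : 2 ≤ s.length) :
    shift_score_alt s shift = fP s shift.toNat := by
  simp only [shift_score_alt, if_pos h, PySem.List.len_eq]
  simp only [PySem.List.pyRange_zero_natCast, List.map_map]
  apply List.map_congr_left
  intro j hj
  simp only [List.mem_range] at hj
  simp only [Function.comp]
  by_cases hc : j < shift.toNat
  · rw [if_pos (by exact_mod_cast (by omega : (j : Int) < shift)), if_pos hc]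
    rw [show (0 : Int) = ((0 : Nat) : Int) from rfl, PySem.List.pyGet?_natCast]
    rw [List.getD_eq_getElem?_getD]
  · rw [if_neg (by omega), if_neg hc]
    rw [show (j : Int) - shift = ((j - shift.toNat : Nat) : Int) by omega, PySem.List.pyGet?_natCast]
    rw [List.getD_eq_getElem?_getD]

lemma alt_neg (s : List Int) (shift : Int) (h : shift < 0) (hs : 2 ≤ s.length) :
    shift_score_alt s shift = fN s (-shift).toNat := by
  simp only [shift_score_alt, if_neg (by omega : ¬ shift > 0), if_pos h, PySem.List.len_eq]
  simp only [PySem.List.pyRange_zero_natCast, List.map_map]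
  apply List.map_congr_left
  intro j hj
  simp only [List.mem_range] at hj
  simp only [Function.comp]
  by_cases hc : j + (-shift).toNat < s.length
  · rw [if_pos (by omega), if_pos hc]
    rw [show (j : Int) + -shift = ((j + (-shift).toNat : Nat) : Int) by omega, PySem.List.pyGet?_natCast]
    rw [List.getD_eq_getElem?_getD]
  · rw [if_neg (by omega), if_neg hc]
    have hlast : PySem.List.pyGet? s (-1) = s[s.length - 1]? := by
      obtain ⟨t, x, hx⟩ : ∃ t x, s = t ++ [x] := by
        rcases List.eq_nil_or_concat s with h0 | ⟨t, x, h0⟩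
        · exfalso; rw [h0] at hs; simp at hs
        · exact ⟨t, x, by simpa [List.concat_eq_append] using h0⟩
      subst hx
      simp [PySem.List.pyGet?, PySem.List.pyIdx?]
    rw [hlast, List.getD_eq_getElem?_getD]

lemma pyRange_len (shift : Int) (h : 0 ≤ shift) :
    (PySem.List.pyRange 0 shift 1).length = shift.toNat := by
  rw [show shift = ((shift.toNat : Nat) : Int) by omega, PySem.List.pyRange_zero_natCast]
  simp
  omega

-- ===== VERDICT (by name: the statement is the Claim_ definition above) =====
theorem shift_score_spec : Claim_equal_shift_score := by
  intro score shift _hdom hpre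
  unfold Spec_shift_score shift_score
  rcases eq_or_ne shift 0 with h0 | h0
  · subst h0
    simp [shift_score_alt, PySem.List.pyRange]
  · have hs : 2 ≤ score.length := by
      rcases hpre with h | h
      · exact absurd h h0
      · exact h
    rcases lt_or_gt_of_ne h0 with hneg | hpos
    · rw [if_neg (by omega)]
      have hlen : (PySem.List.pyRange 0 (-shift) 1).length = (-shift).toNat :=
        pyRange_len (-shift) (by omega)
      rw [List.foldl_const, hlen, fN_iterate score hs _ _ (fun l => rfl), alt_neg score shift hneg hs]
    · rw [if_pos (by omega)]
      have hlen : (PySem.List.pyRange 0 shift 1).length = shift.toNat :=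
        pyRange_len shift (by omega)
      rw [List.foldl_const, hlen, fP_iterate score hs _ _ (fun l => rfl), alt_pos score shift hpos hs]
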